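-- pv_equiv track=rewrite | github.com/nrupala/agentic-os | engine/omega_meta_learner.py | determine_goal_type
-- ===== SOURCE A (Python) =====
-- def determine_goal_type(goal: str) -> str:
--     """Classify goal type for strategy selection."""
--     goal_lower = goal.lower()
--
--     if any(x in goal_lower for x in ["fix", "bug", "error", "crash", "issue"]):
--         return "bug_fix"
--     elif any(x in goal_lower for x in ["refactor", "improve", "optimize", "clean"]):
--         return "refactor"
--     elif any(x in goal_lower for x in ["create", "new", "build", "implement", "add"]):
--         return "feature"
--     elif any(x in goal_lower for x in ["api", "endpoint", "rest", "service"]):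
--         return "api"
--     elif any(x in goal_lower for x in ["web", "server", "http"]):
--         return "web_server"
--     elif any(x in goal_lower for x in ["test", "spec", "verify"]):
--         return "test"
--     else:
--         return "general"
-- ===== SOURCE B (Python) =====
-- _CATS = ("bug_fix", "refactor", "feature", "api", "web_server", "test")
-- _RANK = {
--     "fix": 0, "bug": 0, "error": 0, "crash": 0, "issue": 0,
--     "refactor": 1, "improve": 1, "optimize": 1, "clean": 1,
--     "create": 2, "new": 2, "build": 2, "implement": 2, "add": 2,
--     "api": 3, "endpoint": 3, "rest": 3, "service": 3,
--     "web": 4, "server": 4, "http": 4,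
--     "test": 5, "spec": 5, "verify": 5,
-- }
--
-- def determine_goal_type(goal: str) -> str:
--     """Classify goal type: one scan over positions, keeping the best (lowest) rank
--     of any keyword that starts at that position; the minimal rank wins."""
--     g = goal.lower()
--     best = len(_CATS)
--     for i in range(len(g)):
--         for kw, r in _RANK.items():
--             if r < best and g.startswith(kw, i):
--                 best = r
--     return _CATS[best] if best < len(_CATS) else "general"
-- ===== Notes on version B (the rewrite author's own statement) =====
-- stated objective: alternative
-- what changed: Instead of per-category substring searches in priority order, B makes a single scan over the string's positions, prefix-matching all keywords at each position and keeping the minimum category rank; the minimal rank determines the category.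
import Mathlib
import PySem

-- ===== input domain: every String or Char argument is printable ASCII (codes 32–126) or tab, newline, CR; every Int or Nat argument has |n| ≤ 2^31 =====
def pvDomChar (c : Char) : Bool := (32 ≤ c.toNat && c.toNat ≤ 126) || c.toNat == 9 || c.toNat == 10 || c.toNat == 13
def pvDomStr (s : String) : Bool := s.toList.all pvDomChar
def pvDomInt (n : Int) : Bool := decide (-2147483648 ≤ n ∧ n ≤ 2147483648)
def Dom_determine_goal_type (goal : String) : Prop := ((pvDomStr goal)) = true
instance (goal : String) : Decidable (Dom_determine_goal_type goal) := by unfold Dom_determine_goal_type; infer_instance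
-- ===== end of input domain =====

-- ===== PORT A =====
-- B scans the string's positions once, prefix-matching all keywords at each position and
-- keeping the minimum category rank, instead of A's per-category substring searches.
def determine_goal_type (goal : String) : String :=
  let goal_lower := PySem.Str.lower goal
  if ["fix", "bug", "error", "crash", "issue"].any (fun x => PySem.Str.isIn x goal_lower) then "bug_fix"
  else if ["refactor", "improve", "optimize", "clean"].any (fun x => PySem.Str.isIn x goal_lower) then "refactor"
  else if ["create", "new", "build", "implement", "add"].any (fun x => PySem.Str.isIn x goal_lower) then "feature"
  else if ["api", "endpoint", "rest", "service"].any (fun x => PySem.Str.isIn x goal_lower) then "api"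
  else if ["web", "server", "http"].any (fun x => PySem.Str.isIn x goal_lower) then "web_server"
  else if ["test", "spec", "verify"].any (fun x => PySem.Str.isIn x goal_lower) then "test"
  else "general"

-- ===== PORT B =====
def goalCats : List String := ["bug_fix", "refactor", "feature", "api", "web_server", "test"]

def goalRank : List (List Char × Nat) :=
  [("fix".toList, 0), ("bug".toList, 0), ("error".toList, 0), ("crash".toList, 0), ("issue".toList, 0),
   ("refactor".toList, 1), ("improve".toList, 1), ("optimize".toList, 1), ("clean".toList, 1),
   ("create".toList, 2), ("new".toList, 2), ("build".toList, 2), ("implement".toList, 2), ("add".toList, 2),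
   ("api".toList, 3), ("endpoint".toList, 3), ("rest".toList, 3), ("service".toList, 3),
   ("web".toList, 4), ("server".toList, 4), ("http".toList, 4),
   ("test".toList, 5), ("spec".toList, 5), ("verify".toList, 5)]

-- inner loop: all (kw, r) pairs tried at the current position (the current suffix)
def goalBestAt (suffix : List Char) (best : Nat) : Nat :=
  goalRank.foldl (fun b p => if p.2 < b ∧ p.1.isPrefixOf suffix then p.2 else b) best

-- outer loop: i over range(len(g)), i.e. over the nonempty suffixes of g
def goalScanBest : List Char → Nat → Nat
  | [], best => best
  | c :: rest, best => goalScanBest rest (goalBestAt (c :: rest) best)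

def determine_goal_type_alt (goal : String) : String :=
  let g := (PySem.Str.lower goal).toList
  let best := goalScanBest g 6
  if best < 6 then goalCats.getD best "" else "general"

-- ===== PRECONDITION & SPEC =====
def Spec_determine_goal_type (goal : String) (out : String) : Prop := out = determine_goal_type_alt goal
instance (goal : String) (out : String) : Decidable (Spec_determine_goal_type goal out) := by unfold Spec_determine_goal_type; infer_instance

-- ===== CLAIM =====
def Claim_equal_determine_goal_type : Prop := ∀ (goal : String), Dom_determine_goal_type goal → Spec_determine_goal_type goal (determine_goal_type goal)

-- ===== LEMMAS AND PROOFS =====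

-- generic facts about the inner fold, stated over an arbitrary pair list
theorem goalFold_le (s : List Char) (rs : List (List Char × Nat)) (b : Nat) :
    rs.foldl (fun b p => if p.2 < b ∧ p.1.isPrefixOf s then p.2 else b) b ≤ b := by
  induction rs generalizing b with
  | nil => simp [List.foldl]
  | cons p t ih =>
      simp only [List.foldl]
      split_ifs with h
      · exact le_trans (ih p.2) (Nat.le_of_lt h.1)
      · exact ih b

theorem goalFold_hit (s : List Char) (rs : List (List Char × Nat)) (b : Nat)
    (kw : List Char) (r : Nat) (hmem : (kw, r) ∈ rs) (hpre : kw.isPrefixOf s = true) :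
    rs.foldl (fun b p => if p.2 < b ∧ p.1.isPrefixOf s then p.2 else b) b ≤ r := by
  induction rs generalizing b with
  | nil => cases hmem
  | cons p t ih =>
      simp only [List.foldl]
      rcases List.mem_cons.mp hmem with h | h
      · subst h
        simp only
        split_ifs with hc
        · exact goalFold_le s t r
        · have : ¬ r < b := fun hlt => hc ⟨hlt, hpre⟩
          exact le_trans (goalFold_le s t b) (Nat.le_of_not_lt this)
      · exact ih _ h

theorem goalFold_sound (s : List Char) (rs : List (List Char × Nat)) (b : Nat) :
    rs.foldl (fun b p => if p.2 < b ∧ p.1.isPrefixOf s then p.2 else b) b = b ∨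
      ∃ p ∈ rs, rs.foldl (fun b p => if p.2 < b ∧ p.1.isPrefixOf s then p.2 else b) b = p.2 ∧
        p.1.isPrefixOf s = true := by
  induction rs generalizing b with
  | nil => exact Or.inl rfl
  | cons p t ih =>
      simp only [List.foldl]
      rcases ih (if p.2 < b ∧ p.1.isPrefixOf s then p.2 else b) with h | ⟨q, hq, hv, hp⟩
      · rw [h]
        split_ifs at * with hc
        · exact Or.inr ⟨p, List.mem_cons_self .., h ▸ ⟨rfl, hc.2⟩⟩
        · exact Or.inl rfl
      · exact Or.inr ⟨q, List.mem_cons_of_mem _ hq, ⟨hv, hp⟩⟩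

theorem goalBestAt_le (s : List Char) (b : Nat) : goalBestAt s b ≤ b := goalFold_le s goalRank b

theorem goalScanBest_le (l : List Char) (b : Nat) : goalScanBest l b ≤ b := by
  induction l generalizing b with
  | nil => simp [goalScanBest]
  | cons c t ih => exact le_trans (ih _) (goalBestAt_le _ b)

theorem goalScanBest_complete (l : List Char) (b : Nat) (kw : List Char) (r : Nat)
    (hmem : (kw, r) ∈ goalRank) (hne : kw ≠ [])
    (j : Nat) (hpre : kw <+: (l.drop j)) : goalScanBest l b ≤ r := by
  induction l generalizing j b with
  | nil =>
      exfalso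
      simp only [List.drop_nil] at hpre
      exact hne (List.prefix_nil.mp hpre)
  | cons c t ih =>
      cases j with
      | zero =>
          have hp : kw.isPrefixOf (c :: t) = true := List.isPrefixOf_iff_prefix.mpr hpre
          calc goalScanBest (c :: t) b = goalScanBest t (goalBestAt (c :: t) b) := rfl
            _ ≤ goalBestAt (c :: t) b := goalScanBest_le t _
            _ ≤ r := goalFold_hit _ _ _ _ _ hmem hp
      | succ j' => exact ih _ j' hpre

theorem goalScanBest_sound (l : List Char) (b : Nat) :
    goalScanBest l b = b ∨ ∃ p ∈ goalRank, goalScanBest l b = p.2 ∧ PySem.Chars.isIn p.1 l = true := by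
  induction l generalizing b with
  | nil => exact Or.inl rfl
  | cons c t ih =>
      simp only [goalScanBest]
      rcases ih (goalBestAt (c :: t) b) with h | ⟨q, hq, hv, hIn⟩
      · rw [h]
        unfold goalBestAt
        rcases goalFold_sound (c :: t) goalRank b with h2 | ⟨q, hq, hv, hp⟩
        · exact Or.inl h2
        · refine Or.inr ⟨q, hq, hv, ?_⟩
          exact (PySem.Chars.exists_prefix_drop_iff_isIn _ _).mp ⟨0, by simpa using List.isPrefixOf_iff_prefix.mp hp⟩
      · refine Or.inr ⟨q, hq, hv, ?_⟩
        rcases (PySem.Chars.exists_prefix_drop_iff_isIn _ _).mpr hIn with ⟨j, hj⟩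
        exact (PySem.Chars.exists_prefix_drop_iff_isIn _ _).mp ⟨j + 1, by simpa using hj⟩

theorem goalScan_hit (l kw : List Char) (r : Nat)
    (hmem : (kw, r) ∈ goalRank) (hne : kw ≠ [])
    (hIn : PySem.Chars.isIn kw l = true) : goalScanBest l 6 ≤ r := by
  rcases (PySem.Chars.exists_prefix_drop_iff_isIn kw l).mpr hIn with ⟨j, hj⟩
  exact goalScanBest_complete l 6 kw r hmem hne j hj

theorem goalScan_hit_any (l : List Char) (ws : List String) (k : Nat)
    (hws : ∀ w ∈ ws, (w.toList, k) ∈ goalRank ∧ w.toList ≠ [])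
    (h : ∃ w ∈ ws, PySem.Chars.isIn w.toList l = true) : goalScanBest l 6 ≤ k := by
  rcases h with ⟨w, hw, hIn⟩
  rcases hws w hw with ⟨hm, hne⟩
  exact goalScan_hit l _ k hm hne hIn

theorem goalScan_val (l : List Char) (k : Nat) (hk : k < 6)
    (hup : goalScanBest l 6 ≤ k)
    (hlow : ∀ p ∈ goalRank, PySem.Chars.isIn p.1 l = true → k ≤ p.2) :
    goalScanBest l 6 = k := by
  rcases goalScanBest_sound l 6 with h | ⟨p, hp, hv, hIn⟩
  · omega
  · have hk2 := hlow p hp hIn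
    rw [hv]
    omega

-- ===== VERDICT =====
theorem determine_goal_type_spec : Claim_equal_determine_goal_type := by
  intro goal _
  unfold Spec_determine_goal_type determine_goal_type
  simp only [List.any_eq_true, PySem.Str.isIn_eq, PySem.Str.toList_lower]
  set l := PySem.Chars.lower goal.toList with hl
  split_ifs with h0 h1 h2 h3 h4 h5
  · have hv : goalScanBest l 6 = 0 := goalScan_val l 0 (by omega)
      (goalScan_hit_any l ["fix", "bug", "error", "crash", "issue"] 0 (by decide) h0)
      (fun p hp hIn => Nat.zero_le _)
    simp only [determine_goal_type_alt, PySem.Str.toList_lower, ← hl, hv]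
    decide
  · have hv : goalScanBest l 6 = 1 := goalScan_val l 1 (by omega)
      (goalScan_hit_any l ["refactor", "improve", "optimize", "clean"] 1 (by decide) h1)
      (by
        push Not at h0
        intro p hp hIn
        simp only [goalRank, List.mem_cons, List.not_mem_nil, or_false] at hp
        rcases hp with rfl|rfl|rfl|rfl|rfl|rfl|rfl|rfl|rfl|rfl|rfl|rfl|rfl|rfl|rfl|rfl|rfl|rfl|rfl|rfl|rfl|rfl|rfl|rfl <;>
          first
            | omega
            | exact absurd hIn (by first
            | exact h0 _ (by decide)))
    simp only [determine_goal_type_alt, PySem.Str.toList_lower, ← hl, hv]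
    decide
  · have hv : goalScanBest l 6 = 2 := goalScan_val l 2 (by omega)
      (goalScan_hit_any l ["create", "new", "build", "implement", "add"] 2 (by decide) h2)
      (by
        push Not at h0 h1
        intro p hp hIn
        simp only [goalRank, List.mem_cons, List.not_mem_nil, or_false] at hp
        rcases hp with rfl|rfl|rfl|rfl|rfl|rfl|rfl|rfl|rfl|rfl|rfl|rfl|rfl|rfl|rfl|rfl|rfl|rfl|rfl|rfl|rfl|rfl|rfl|rfl <;>
          first
            | omega
            | exact absurd hIn (by first
            | exact h0 _ (by decide)
            | exact h1 _ (by decide)))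
    simp only [determine_goal_type_alt, PySem.Str.toList_lower, ← hl, hv]
    decide
  · have hv : goalScanBest l 6 = 3 := goalScan_val l 3 (by omega)
      (goalScan_hit_any l ["api", "endpoint", "rest", "service"] 3 (by decide) h3)
      (by
        push Not at h0 h1 h2
        intro p hp hIn
        simp only [goalRank, List.mem_cons, List.not_mem_nil, or_false] at hp
        rcases hp with rfl|rfl|rfl|rfl|rfl|rfl|rfl|rfl|rfl|rfl|rfl|rfl|rfl|rfl|rfl|rfl|rfl|rfl|rfl|rfl|rfl|rfl|rfl|rfl <;>
          first
            | omega
            | exact absurd hIn (by first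
            | exact h0 _ (by decide)
            | exact h1 _ (by decide)
            | exact h2 _ (by decide)))
    simp only [determine_goal_type_alt, PySem.Str.toList_lower, ← hl, hv]
    decide
  · have hv : goalScanBest l 6 = 4 := goalScan_val l 4 (by omega)
      (goalScan_hit_any l ["web", "server", "http"] 4 (by decide) h4)
      (by
        push Not at h0 h1 h2 h3
        intro p hp hIn
        simp only [goalRank, List.mem_cons, List.not_mem_nil, or_false] at hp
        rcases hp with rfl|rfl|rfl|rfl|rfl|rfl|rfl|rfl|rfl|rfl|rfl|rfl|rfl|rfl|rfl|rfl|rfl|rfl|rfl|rfl|rfl|rfl|rfl|rfl <;>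
          first
            | omega
            | exact absurd hIn (by first
            | exact h0 _ (by decide)
            | exact h1 _ (by decide)
            | exact h2 _ (by decide)
            | exact h3 _ (by decide)))
    simp only [determine_goal_type_alt, PySem.Str.toList_lower, ← hl, hv]
    decide
  · have hv : goalScanBest l 6 = 5 := goalScan_val l 5 (by omega)
      (goalScan_hit_any l ["test", "spec", "verify"] 5 (by decide) h5)
      (by
        push Not at h0 h1 h2 h3 h4
        intro p hp hIn
        simp only [goalRank, List.mem_cons, List.not_mem_nil, or_false] at hp
        rcases hp with rfl|rfl|rfl|rfl|rfl|rfl|rfl|rfl|rfl|rfl|rfl|rfl|rfl|rfl|rfl|rfl|rfl|rfl|rfl|rfl|rfl|rfl|rfl|rfl <;>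
          first
            | omega
            | exact absurd hIn (by first
            | exact h0 _ (by decide)
            | exact h1 _ (by decide)
            | exact h2 _ (by decide)
            | exact h3 _ (by decide)
            | exact h4 _ (by decide)))
    simp only [determine_goal_type_alt, PySem.Str.toList_lower, ← hl, hv]
    decide
  · have hv : goalScanBest l 6 = 6 := by
      rcases goalScanBest_sound l 6 with h | ⟨p, hp, hv, hIn⟩
      · exact h
      · exfalso
        push Not at h0 h1 h2 h3 h4 h5
        simp only [goalRank, List.mem_cons, List.not_mem_nil, or_false] at hp
        rcases hp with rfl|rfl|rfl|rfl|rfl|rfl|rfl|rfl|rfl|rfl|rfl|rfl|rfl|rfl|rfl|rfl|rfl|rfl|rfl|rfl|rfl|rfl|rfl|rfl <;>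
          exact absurd hIn (by first
            | exact h0 _ (by decide)
            | exact h1 _ (by decide)
            | exact h2 _ (by decide)
            | exact h3 _ (by decide)
            | exact h4 _ (by decide)
            | exact h5 _ (by decide))
    simp only [determine_goal_type_alt, PySem.Str.toList_lower, ← hl, hv]
    decide
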